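-- pv_equiv track=rewrite | github.com/glennlopez/COMP3380 | assignment3/A3Q3/main.py | on
-- ===== SOURCE A (Python) =====
-- def on(headingsA, headingsB):   # getting the index of each table where they match
--     matchedColumns = []
--     for index_a, heading_a in enumerate(headingsA):
--         for index_b, heading_b in enumerate(headingsB):
--             if heading_a == heading_b:
--                 matchedColumnsTuple = (index_a, index_b)
--                 matchedColumns.append(matchedColumnsTuple)
--     return matchedColumns
-- ===== SOURCE B (Python) =====
-- def on(headingsA, headingsB):   # getting the index of each table where they match
--     # index headingsB once: heading -> list of its positions, in order
--     positions = {}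
--     for index_b, heading_b in enumerate(headingsB):
--         positions.setdefault(heading_b, []).append(index_b)
--     matchedColumns = []
--     for index_a, heading_a in enumerate(headingsA):
--         for index_b in positions.get(heading_a, []):
--             matchedColumns.append((index_a, index_b))
--     return matchedColumns
-- ===== Notes on version B (the rewrite author's own statement) =====
-- stated objective: alternative
-- what changed: Replaces the nested scan of headingsB for every heading of headingsA by a dict built once mapping each heading of headingsB to its index list, then a single pass over headingsA.
import Mathlib
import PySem

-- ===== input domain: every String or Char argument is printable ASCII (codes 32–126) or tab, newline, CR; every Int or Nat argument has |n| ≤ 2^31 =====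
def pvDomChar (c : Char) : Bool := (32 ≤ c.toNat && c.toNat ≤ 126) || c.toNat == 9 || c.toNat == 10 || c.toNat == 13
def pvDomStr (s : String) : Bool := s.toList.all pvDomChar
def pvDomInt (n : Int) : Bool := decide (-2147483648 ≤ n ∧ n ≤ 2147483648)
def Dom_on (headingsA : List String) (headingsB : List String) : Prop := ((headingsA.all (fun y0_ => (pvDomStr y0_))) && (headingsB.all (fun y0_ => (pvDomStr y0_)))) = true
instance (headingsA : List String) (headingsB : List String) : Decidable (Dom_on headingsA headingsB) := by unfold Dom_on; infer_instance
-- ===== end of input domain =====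

-- B replaces A's nested scan by a dict from each heading of headingsB to its index list,
-- built once, then a single pass over headingsA (objective: alternative algorithm).


-- ===== PORT A =====
def on (headingsA : List String) (headingsB : List String) : List (Int × Int) :=
  (PySem.List.enumerate headingsA).foldl
    (fun matchedColumns p =>
      (PySem.List.enumerate headingsB).foldl
        (fun matchedColumns q =>
          if p.2 == q.2 then matchedColumns ++ [(p.1, q.1)] else matchedColumns)
        matchedColumns)
    []

-- ===== PORT B =====
def on_alt (headingsA : List String) (headingsB : List String) : List (Int × Int) :=
  let positions : PySem.Dict String (List Int) :=
    (PySem.List.enumerate headingsB).foldl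
      (fun d q => d.modify q.2 [] (fun l => l ++ [q.1])) PySem.Dict.empty
  (PySem.List.enumerate headingsA).foldl
    (fun matchedColumns p =>
      matchedColumns ++ (positions.getD p.2 []).map (fun j => (p.1, j)))
    []

-- ===== PRECONDITION & SPEC =====
def Spec_on (headingsA : List String) (headingsB : List String) (out : List (Int × Int)) : Prop := out = on_alt headingsA headingsB
instance (headingsA : List String) (headingsB : List String) (out : List (Int × Int)) : Decidable (Spec_on headingsA headingsB out) := by unfold Spec_on; infer_instance

-- ===== CLAIM (what is proved, stated in full; the proofs are below) =====
def Claim_equal_on : Prop := ∀ (headingsA : List String) (headingsB : List String), Dom_on headingsA headingsB → Spec_on headingsA headingsB (on headingsA headingsB)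

-- ===== LEMMAS AND PROOFS =====

-- B's dict lookup returns exactly the indices of headingsB whose heading equals h, in order.
theorem positions_getD (headingsB : List String) (h : String) :
    ((PySem.List.enumerate headingsB).foldl
      (fun d q => d.modify q.2 [] (fun l => l ++ [q.1])) PySem.Dict.empty).getD h []
    = (((PySem.List.enumerate headingsB).filter (fun q => q.2 == h)).map (·.1)) := by
  have hm : (PySem.List.enumerate headingsB).foldl
      (fun d q => d.modify q.2 [] (fun l => l ++ [q.1])) PySem.Dict.empty
      = ((PySem.List.enumerate headingsB).map (fun q => (q.2, q.1))).foldl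
          (fun d p => d.modify p.1 [] (fun l => l ++ [p.2])) PySem.Dict.empty := by
    rw [List.foldl_map]
  rw [hm, PySem.Dict.getD_foldl_modify_append]
  simp [List.filter_map, List.map_map]
  rfl

-- each step of A's outer loop equals the corresponding step of B's outer loop
theorem step_eq (headingsB : List String) (acc : List (Int × Int)) (p : Int × String) :
    (PySem.List.enumerate headingsB).foldl
        (fun matchedColumns q =>
          if p.2 == q.2 then matchedColumns ++ [(p.1, q.1)] else matchedColumns) acc
    = acc ++ (((PySem.List.enumerate headingsB).foldl
          (fun d q => d.modify q.2 [] (fun l => l ++ [q.1])) PySem.Dict.empty).getD p.2 []).map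
          (fun j => (p.1, j)) := by
  rw [PySem.List.foldl_append_if, positions_getD, List.map_map]
  congr 1
  rw [List.filter_congr (l := PySem.List.enumerate headingsB)
      (p := fun q => p.2 == q.2) (q := fun q => q.2 == p.2) (by intro q _; simp [eq_comm])]
  rfl

-- ===== VERDICT (by name: the statement is the Claim_ definition above) =====
theorem on_spec : Claim_equal_on := by
  intro headingsA headingsB _
  unfold Spec_on on on_alt
  simp only [step_eq]
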